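-- pv_equiv track=rewrite | github.com/uldash/lessons-python | STEPIC/02 Поколение Python курс для продвинутых/04 Вложенные списки/04.5 Матрицы. Часть 2/09.py | is_el_sequence
-- ===== SOURCE A (Python) =====
-- def is_el_sequence(matrix):
--     n = len(matrix)
--     tmp = []
--     for i in range(n):
--         tmp.extend(matrix[i])
--     for i in range(n**2):
--         if not i + 1 in tmp:
--             return False
--     return True
-- ===== SOURCE B (Python) =====
-- def is_el_sequence(matrix):
--     n = len(matrix)
--     missing = set(range(1, n * n + 1))
--     for row in matrix:
--         for v in row:
--             missing.discard(v)
--     return not missing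
-- ===== Notes on version B (the rewrite author's own statement) =====
-- stated objective: alternative
-- what changed: Inverts the traversal: instead of flattening the matrix and scanning the flat list once per target value (quadratic membership tests), B maintains a set of not-yet-seen targets 1..n^2 and discards each matrix element from it in a single pass, returning whether the set emptied.
import Mathlib
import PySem

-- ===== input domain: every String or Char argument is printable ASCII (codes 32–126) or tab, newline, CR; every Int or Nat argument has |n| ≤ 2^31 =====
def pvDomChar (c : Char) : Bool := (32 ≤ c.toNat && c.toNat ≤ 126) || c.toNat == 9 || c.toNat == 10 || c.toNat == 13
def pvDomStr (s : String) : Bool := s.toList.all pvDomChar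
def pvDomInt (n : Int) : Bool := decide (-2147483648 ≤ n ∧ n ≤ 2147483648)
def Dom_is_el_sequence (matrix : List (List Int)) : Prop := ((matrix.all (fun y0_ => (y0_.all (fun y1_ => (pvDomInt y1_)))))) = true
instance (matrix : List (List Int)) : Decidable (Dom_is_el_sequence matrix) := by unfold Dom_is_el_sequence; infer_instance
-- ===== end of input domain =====

-- B replaces A's "flatten, then scan the flat list once per target 1..n^2" with a single pass
-- that discards each matrix element from a maintained set of unseen targets (alternative traversal).


-- ===== PORT A =====
-- the second loop of A: 'for i in range(n**2): if not i + 1 in tmp: return False / return True'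
def pvCheckA (tmp : List Int) : List Int → Bool
  | [] => true
  | i :: rest => if !(tmp.contains (i + 1)) then false else pvCheckA tmp rest

def is_el_sequence (matrix : List (List Int)) : Bool :=
  let n := matrix.length
  let tmp := (PySem.List.pyRange 0 (n : Int) 1).foldl
    (fun acc i => acc ++ PySem.List.pyGetD matrix i []) []
  pvCheckA tmp (PySem.List.pyRange 0 ((n : Int) ^ 2) 1)

-- ===== PORT B =====
def is_el_sequence_alt (matrix : List (List Int)) : Bool :=
  let n := matrix.length
  let missing : PySem.Set Int :=
    PySem.Set.ofList (PySem.List.pyRange 1 ((n : Int) * (n : Int) + 1) 1)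
  let missing := matrix.foldl
    (fun s row => row.foldl (fun s v => PySem.Set.discard s v) s) missing
  missing.isEmpty

-- ===== PRECONDITION & SPEC =====
def Spec_is_el_sequence (matrix : List (List Int)) (out : Bool) : Prop := out = is_el_sequence_alt matrix
instance (matrix : List (List Int)) (out : Bool) : Decidable (Spec_is_el_sequence matrix out) := by unfold Spec_is_el_sequence; infer_instance

-- ===== CLAIM (what is proved, stated in full; the proofs are below) =====
def Claim_equal_is_el_sequence : Prop := ∀ (matrix : List (List Int)), Dom_is_el_sequence matrix → Spec_is_el_sequence matrix (is_el_sequence matrix)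

-- ===== LEMMAS AND PROOFS =====

-- A's accumulator loop 'tmp.extend(matrix[i])' builds the flattening
theorem pv_foldl_append_flatten (l : List (List Int)) (a : List Int) :
    l.foldl (fun acc row => acc ++ row) a = a ++ l.flatten := by
  induction l generalizing a with
  | nil => simp
  | cons h t ih => simp [ih]

-- A's early-return scan is an 'all' over the range
theorem pvCheckA_eq_true_iff (tmp : List Int) (l : List Int) :
    pvCheckA tmp l = true ↔ ∀ i ∈ l, (i + 1) ∈ tmp := by
  induction l with
  | nil => simp [pvCheckA]
  | cons h t ih =>
    by_cases hc : (h + 1) ∈ tmp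
    · simp [pvCheckA, hc, ih]
    · simp [pvCheckA, hc]

-- discarding every element of `flat` from a set leaves exactly the members not in `flat`
theorem pv_mem_foldl_discard (flat : List Int) (s : PySem.Set Int) (x : Int) :
    x ∈ flat.foldl (fun s v => PySem.Set.discard s v) s ↔ x ∈ s ∧ x ∉ flat := by
  induction flat generalizing s with
  | nil => simp
  | cons h t ih =>
    simp only [List.foldl_cons, ih, PySem.Set.mem_discard, List.mem_cons]
    tauto

-- ===== VERDICT (by name: the statement is the Claim_ definition above) =====
theorem is_el_sequence_spec : Claim_equal_is_el_sequence := by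
  intro matrix _
  unfold Spec_is_el_sequence is_el_sequence is_el_sequence_alt
  simp only []
  rw [Bool.eq_iff_iff]
  -- rewrite A's first loop to the flattening
  rw [show (PySem.List.pyRange 0 (matrix.length : Int) 1).foldl
        (fun acc i => acc ++ PySem.List.pyGetD matrix i []) []
      = matrix.flatten from by
    rw [PySem.List.foldl_pyRange_zero_pyGetD' matrix [] (fun acc row => acc ++ row) []]
    exact pv_foldl_append_flatten matrix []]
  -- rewrite B's nested loop to a fold over the flattening
  rw [show matrix.foldl
        (fun s row => row.foldl (fun s v => PySem.Set.discard s v) s)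
        (PySem.Set.ofList (PySem.List.pyRange 1 ((matrix.length : Int) * (matrix.length : Int) + 1) 1))
      = matrix.flatten.foldl (fun s v => PySem.Set.discard s v)
        (PySem.Set.ofList (PySem.List.pyRange 1 ((matrix.length : Int) * (matrix.length : Int) + 1) 1))
      from List.foldl_flatten.symm]
  rw [pvCheckA_eq_true_iff, List.isEmpty_iff, List.eq_nil_iff_forall_not_mem]
  constructor
  · intro hA x hx
    rw [pv_mem_foldl_discard] at hx
    obtain ⟨hxs, hxf⟩ := hx
    rw [PySem.Set.mem_ofList, PySem.List.mem_pyRange_one] at hxs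
    exact hxf (by
      have := hA (x - 1) (by rw [PySem.List.mem_pyRange_one]; constructor <;> [omega; nlinarith [hxs.1, hxs.2]]
      )
      simpa using this)
  · intro hB i hi
    rw [PySem.List.mem_pyRange_one] at hi
    by_contra hmem
    exact hB (i + 1) (by
      rw [pv_mem_foldl_discard]
      refine ⟨?_, hmem⟩
      rw [PySem.Set.mem_ofList, PySem.List.mem_pyRange_one]
      constructor <;> [omega; nlinarith [hi.1, hi.2]])
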